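-- pv_equiv track=rewrite | github.com/jimhorng/algorithm | min_cpu_run_task/prob2_sol1.py | _binary_search_min_cpus
-- ===== SOURCE A (Python) =====
-- import heapq
--
-- def _simulate(sorted_tasks, num_cpus, min_possible_end):
--     """
--     Greedily assign tasks to `num_cpus` CPUs.
--     Returns True if all tasks finish by min_possible_end.
--     """
--     cpu_times = [0] * num_cpus   # min-heap: each entry = time CPU becomes free
--     heapq.heapify(cpu_times)
--
--     for start, length in sorted_tasks:
--         earliest_available = heapq.heappop(cpu_times)
--         actual_start = max(start, earliest_available)
--         end_time = actual_start + length
--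
--         if end_time > min_possible_end:
--             return False                     # this k cannot achieve min end time
--
--         heapq.heappush(cpu_times, end_time)
--
--     return True
--
-- def _binary_search_min_cpus(sorted_tasks, min_possible_end):
--     n = len(sorted_tasks)
--     left, right = 1, n
--     result = n
--
--     while left <= right:
--         mid = (left + right) // 2
--         if _simulate(sorted_tasks, mid, min_possible_end):
--             result = mid
--             right = mid - 1
--         else:
--             left = mid + 1
--
--     return result
-- ===== SOURCE B (Python) =====
-- import heapq
--
-- def _simulate(sorted_tasks, num_cpus, min_possible_end):
--     cpu_times = [0] * num_cpus   # min-heap: each entry = time CPU becomes free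
--     heapq.heapify(cpu_times)
--     for start, length in sorted_tasks:
--         earliest_available = heapq.heappop(cpu_times)
--         actual_start = max(start, earliest_available)
--         end_time = actual_start + length
--         if end_time > min_possible_end:
--             return False
--         heapq.heappush(cpu_times, end_time)
--     return True
--
-- def _binary_search_min_cpus(sorted_tasks, min_possible_end):
--     # Linear scan: feasibility is monotone in the CPU count, so the first
--     # feasible k in 1..n is the minimum; if none is feasible return n.
--     n = len(sorted_tasks)
--     for num_cpus in range(1, n + 1):
--         if _simulate(sorted_tasks, num_cpus, min_possible_end):
--             return num_cpus
--     return n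
-- ===== Notes on version B (the rewrite author's own statement) =====
-- stated objective: simpler
-- what changed: Replaces the binary search over the CPU count (left/right/mid bisection with a result accumulator) by a linear scan returning the first feasible k in 1..n (default n), relying on a proved monotonicity of the greedy feasibility check.
import Mathlib
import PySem

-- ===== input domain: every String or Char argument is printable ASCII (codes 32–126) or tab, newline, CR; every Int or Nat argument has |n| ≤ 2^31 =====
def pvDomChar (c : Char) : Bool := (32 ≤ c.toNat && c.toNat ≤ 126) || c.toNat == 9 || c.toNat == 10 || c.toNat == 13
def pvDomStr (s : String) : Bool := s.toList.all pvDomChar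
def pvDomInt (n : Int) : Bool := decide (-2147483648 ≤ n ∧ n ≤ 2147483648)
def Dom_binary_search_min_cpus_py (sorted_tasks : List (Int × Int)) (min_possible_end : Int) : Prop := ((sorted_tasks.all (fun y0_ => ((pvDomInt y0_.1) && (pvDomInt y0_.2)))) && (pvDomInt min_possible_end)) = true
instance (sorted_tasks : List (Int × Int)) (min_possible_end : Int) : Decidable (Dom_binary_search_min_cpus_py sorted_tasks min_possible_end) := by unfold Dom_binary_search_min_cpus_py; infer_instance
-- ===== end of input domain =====

-- B replaces A's binary search over the CPU count by a linear scan for the first feasible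
-- count (proved equal via monotonicity of the greedy feasibility check); return values only.

-- ===== PORT A =====
-- A heapq min-heap of ints is modelled by the sorted list of its elements: the heap is
-- observed only through heappop (the minimum, = head) and heappush (= ordered insert),
-- so this is exact for _simulate.
def pvHeapPush (v : Int) (h : List Int) : List Int := List.orderedInsert (· ≤ ·) v h

-- the `for start, length in sorted_tasks` loop of _simulate
def pvSimLoop (min_possible_end : Int) : List (Int × Int) → List Int → Bool
  | [], _ => true
  | _ :: _, [] => true  -- empty heap: Python heappop would raise; unreachable (num_cpus ≥ 1 in all calls)
  | (start, length) :: rest, earliest :: hs =>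
    let actual_start := max start earliest
    let end_time := actual_start + length
    if end_time > min_possible_end then false
    else pvSimLoop min_possible_end rest (pvHeapPush end_time hs)

-- _simulate (shared helper of A and B in the Python module)
def pvSimulate (sorted_tasks : List (Int × Int)) (num_cpus : Int) (min_possible_end : Int) : Bool :=
  pvSimLoop min_possible_end sorted_tasks (List.replicate num_cpus.toNat 0)

-- A's `while left <= right` loop
def pvBsLoop (sorted_tasks : List (Int × Int)) (min_possible_end : Int) (left right result : Int) : Int :=
  if h : left ≤ right then
    let mid := PySem.Int.floordiv (left + right) 2
    if pvSimulate sorted_tasks mid min_possible_end then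
      pvBsLoop sorted_tasks min_possible_end left (mid - 1) mid
    else
      pvBsLoop sorted_tasks min_possible_end (mid + 1) right result
  else result
termination_by (right + 1 - left).toNat
decreasing_by
  · have := PySem.Int.floordiv_two_mid_bounds h; omega
  · have := PySem.Int.floordiv_two_mid_bounds h; omega

def binary_search_min_cpus_py (sorted_tasks : List (Int × Int)) (min_possible_end : Int) : Int :=
  let n : Int := sorted_tasks.length
  pvBsLoop sorted_tasks min_possible_end 1 n n

-- ===== PORT B =====
-- B's `for num_cpus in range(1, n + 1)` loop: first feasible count, else n
def pvScan (sorted_tasks : List (Int × Int)) (min_possible_end : Int) (n : Int) : List Int → Int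
  | [] => n
  | k :: ks =>
    if pvSimulate sorted_tasks k min_possible_end then k
    else pvScan sorted_tasks min_possible_end n ks

def binary_search_min_cpus_py_alt (sorted_tasks : List (Int × Int)) (min_possible_end : Int) : Int :=
  let n : Int := sorted_tasks.length
  pvScan sorted_tasks min_possible_end n (PySem.List.pyRange 1 (n + 1) 1)

-- ===== PRECONDITION & SPEC =====
def Spec_binary_search_min_cpus_py (sorted_tasks : List (Int × Int)) (min_possible_end : Int) (out : Int) : Prop := out = binary_search_min_cpus_py_alt sorted_tasks min_possible_end
instance (sorted_tasks : List (Int × Int)) (min_possible_end : Int) (out : Int) : Decidable (Spec_binary_search_min_cpus_py sorted_tasks min_possible_end out) := by unfold Spec_binary_search_min_cpus_py; infer_instance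

-- ===== CLAIM (what is proved, stated in full; the proofs are below) =====
def Claim_equal_binary_search_min_cpus_py : Prop := ∀ (sorted_tasks : List (Int × Int)) (min_possible_end : Int), Dom_binary_search_min_cpus_py sorted_tasks min_possible_end → Spec_binary_search_min_cpus_py sorted_tasks min_possible_end (binary_search_min_cpus_py sorted_tasks min_possible_end)

-- ===== LEMMAS AND PROOFS =====

-- number of heap entries ≤ x
def pvCnt (l : List Int) (x : Int) : Nat := l.countP (fun v => decide (v ≤ x))

-- heap h' (one more CPU) dominates heap h: at every time x it has at least as many free CPUs
def pvFreer (t s : List Int) : Prop := ∀ x : Int, pvCnt s x ≤ pvCnt t x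

theorem pvCnt_cons (a : Int) (l : List Int) (x : Int) :
    pvCnt (a :: l) x = pvCnt l x + (if a ≤ x then 1 else 0) := by
  simp [pvCnt, List.countP_cons]

theorem pvCnt_push (v : Int) (h : List Int) (x : Int) :
    pvCnt (pvHeapPush v h) x = pvCnt h x + (if v ≤ x then 1 else 0) := by
  unfold pvHeapPush pvCnt
  rw [(List.perm_orderedInsert _ v h).countP_eq]
  simp [List.countP_cons]

theorem pvCnt_zero_of_lt_head {s1 : Int} {ss : List Int} (hs : (s1 :: ss).Pairwise (· ≤ ·))
    {x : Int} (hx : ¬ s1 ≤ x) : pvCnt ss x = 0 := by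
  refine List.countP_eq_zero.2 ?_
  intro a ha
  have h1 : s1 ≤ a := (List.pairwise_cons.1 hs).1 a ha
  simp only [decide_eq_true_eq]
  omega

theorem pvHead_le {t1 s1 : Int} {ts ss : List Int} (ht : (t1 :: ts).Pairwise (· ≤ ·))
    (hdom : pvFreer (t1 :: ts) (s1 :: ss)) : t1 ≤ s1 := by
  have h1 : 0 < pvCnt (s1 :: ss) s1 := by
    rw [pvCnt_cons]; simp
  have h2 : 0 < pvCnt (t1 :: ts) s1 := lt_of_lt_of_le h1 (hdom s1)
  obtain ⟨a, ha, hax⟩ := List.countP_pos_iff.1 h2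
  have : t1 ≤ a := by
    rcases List.mem_cons.1 ha with h | h
    · omega
    · exact (List.pairwise_cons.1 ht).1 a h
  simp only [decide_eq_true_eq] at hax
  omega

theorem pvFreer_step {t1 s1 et es : Int} {ts ss : List Int}
    (ht : (t1 :: ts).Pairwise (· ≤ ·)) (hs : (s1 :: ss).Pairwise (· ≤ ·))
    (hdom : pvFreer (t1 :: ts) (s1 :: ss)) (hee : et ≤ es) :
    pvFreer (pvHeapPush et ts) (pvHeapPush es ss) := by
  intro x
  have ht1 : t1 ≤ s1 := pvHead_le ht hdom
  have hd := hdom x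
  rw [pvCnt_cons, pvCnt_cons] at hd
  rw [pvCnt_push, pvCnt_push]
  by_cases hsx : s1 ≤ x
  · split_ifs at hd ⊢ <;> omega
  · have h0 : pvCnt ss x = 0 := pvCnt_zero_of_lt_head hs hsx
    split_ifs at hd ⊢ <;> omega

theorem pvSimLoop_dom (e : Int) (tasks : List (Int × Int)) :
    ∀ (t s : List Int), t.Pairwise (· ≤ ·) → s.Pairwise (· ≤ ·) → s ≠ [] →
    t.length = s.length + 1 → pvFreer t s →
    pvSimLoop e tasks s = true → pvSimLoop e tasks t = true := by
  induction tasks with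
  | nil => intro t s _ _ _ _ _ _; simp [pvSimLoop]
  | cons task rest ih =>
    obtain ⟨st, l⟩ := task
    intro t s hts hss hne hlen hdom hsim
    match s, t with
    | [], _ => exact absurd rfl hne
    | _ :: _, [] => simp at hlen
    | s1 :: ss, t1 :: ts =>
      have ht1 : t1 ≤ s1 := pvHead_le hts hdom
      simp only [pvSimLoop] at hsim ⊢
      by_cases hes : max st s1 + l > e
      · rw [if_pos hes] at hsim; exact absurd hsim (by simp)
      · rw [if_neg hes] at hsim
        have hee : max st t1 + l ≤ max st s1 + l := by
          have : max st t1 ≤ max st s1 := by omega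
          omega
        rw [if_neg (by omega)]
        refine ih (pvHeapPush (max st t1 + l) ts) (pvHeapPush (max st s1 + l) ss)
          ?_ ?_ ?_ ?_ ?_ hsim
        · exact List.Pairwise.orderedInsert _ _ (List.Pairwise.of_cons hts)
        · exact List.Pairwise.orderedInsert _ _ (List.Pairwise.of_cons hss)
        · have := List.orderedInsert_length (r := (· ≤ ·)) ss (max st s1 + l)
          intro hcon
          rw [pvHeapPush] at hcon
          simp [hcon] at this
        · unfold pvHeapPush
          rw [List.orderedInsert_length, List.orderedInsert_length]
          simpa using hlen
        · exact pvFreer_step hts hss hdom hee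

theorem pvCnt_replicate (n : Nat) (x : Int) :
    pvCnt (List.replicate n 0) x = if (0:Int) ≤ x then n else 0 := by
  induction n with
  | zero => simp [pvCnt]
  | succ m ihm =>
    rw [List.replicate_succ, pvCnt_cons, ihm]
    split_ifs <;> omega

theorem pvSim_succ (tasks : List (Int × Int)) (e : Int) (k : Nat) (hk : 1 ≤ k)
    (h : pvSimLoop e tasks (List.replicate k 0) = true) :
    pvSimLoop e tasks (List.replicate (k + 1) 0) = true := by
  refine pvSimLoop_dom e tasks _ _ ?_ ?_ ?_ ?_ ?_ h
  · exact List.pairwise_replicate_of_refl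
  · exact List.pairwise_replicate_of_refl
  · simp; omega
  · simp
  · intro x
    rw [pvCnt_replicate, pvCnt_replicate]
    split_ifs <;> omega

-- feasibility is monotone in the CPU count
theorem pvSim_mono (tasks : List (Int × Int)) (e : Int) (j k : Int) (hj : 1 ≤ j) (hjk : j ≤ k)
    (h : pvSimulate tasks j e = true) : pvSimulate tasks k e = true := by
  unfold pvSimulate at h ⊢
  have hj' : 1 ≤ j.toNat := by omega
  have hjk' : j.toNat ≤ k.toNat := by omega
  obtain ⟨m, hm⟩ : ∃ m : Nat, k.toNat = j.toNat + m := ⟨k.toNat - j.toNat, by omega⟩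
  rw [hm]
  clear hm
  induction m with
  | zero => simpa using h
  | succ p ihp =>
    have := pvSim_succ tasks e (j.toNat + p) (by omega) ihp
    simpa [Nat.add_assoc] using this

-- the scan skips a prefix of infeasible counts
theorem pvScan_append (tasks : List (Int × Int)) (e n : Int) (xs ys : List Int)
    (hxs : ∀ k ∈ xs, pvSimulate tasks k e = false) :
    pvScan tasks e n (xs ++ ys) = pvScan tasks e n ys := by
  induction xs with
  | nil => rfl
  | cons a as iha =>
    simp only [List.cons_append, pvScan]
    rw [if_neg (by simp [hxs a (by simp)])]
    exact iha (fun k hk => hxs k (by simp [hk]))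

theorem pvScan_all_false (tasks : List (Int × Int)) (e n : Int) (ks : List Int)
    (hks : ∀ k ∈ ks, pvSimulate tasks k e = false) :
    pvScan tasks e n ks = n := by
  induction ks with
  | nil => rfl
  | cons a as iha =>
    simp only [pvScan]
    rw [if_neg (by simp [hks a (by simp)])]
    exact iha (fun k hk => hks k (by simp [hk]))

-- exit facts of A's binary search, by functional induction on its loop
theorem pvBsLoop_post (tasks : List (Int × Int)) (e n : Int) :
    ∀ (left right result : Int),
    1 ≤ left → left ≤ right + 1 → right ≤ n →
    (∀ j : Int, 1 ≤ j → j < left → pvSimulate tasks j e = false) →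
    ((result = n ∧ right = n) ∨
      (pvSimulate tasks result e = true ∧ result = right + 1 ∧ result ≤ n)) →
    ((pvBsLoop tasks e left right result = n ∧
        ∀ j : Int, 1 ≤ j → j ≤ n → pvSimulate tasks j e = false) ∨
      (1 ≤ pvBsLoop tasks e left right result ∧ pvBsLoop tasks e left right result ≤ n ∧
        pvSimulate tasks (pvBsLoop tasks e left right result) e = true ∧
        ∀ j : Int, 1 ≤ j → j < pvBsLoop tasks e left right result →
          pvSimulate tasks j e = false)) := by
  intro left right result
  induction left, right, result using pvBsLoop.induct tasks e with
  | case1 left right result h mid hsim ih =>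
    intro h1 h2 h3 h4 h5
    have hmid := PySem.Int.floordiv_two_mid_bounds h
    rw [pvBsLoop, dif_pos h, if_pos hsim]
    exact ih h1 (by omega) (by omega) h4 (Or.inr ⟨hsim, by omega, by omega⟩)
  | case2 left right result h mid hsim ih =>
    intro h1 h2 h3 h4 h5
    have hmid := PySem.Int.floordiv_two_mid_bounds h
    have hs' : pvSimulate tasks (PySem.Int.floordiv (left + right) 2) e = false := by
      simp only [Bool.not_eq_true] at hsim
      exact hsim
    rw [pvBsLoop, dif_pos h]
    simp only [hs', Bool.false_eq_true, if_false]
    refine ih (by omega) (by omega) h3 ?_ h5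
    intro j hj1 hj2
    by_cases hjl : j < left
    · exact h4 j hj1 hjl
    · by_contra hcon
      have hjt : pvSimulate tasks j e = true := by
        cases hx : pvSimulate tasks j e
        · exact absurd hx hcon
        · rfl
      have := pvSim_mono tasks e j mid hj1 (by omega) hjt
      simp [this] at hsim
  | case3 left right result h =>
    intro h1 h2 h3 h4 h5
    rw [pvBsLoop, dif_neg h]
    rcases h5 with ⟨hr, hrn⟩ | ⟨hp, hr, hrn⟩
    · left
      refine ⟨hr, fun j hj1 hj2 => h4 j hj1 (by omega)⟩
    · right
      exact ⟨by omega, hrn, hp, fun j hj1 hj2 => h4 j hj1 (by omega)⟩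

-- ===== VERDICT (by name: the statement is the Claim_ definition above) =====
theorem binary_search_min_cpus_py_spec : Claim_equal_binary_search_min_cpus_py := by
  unfold Claim_equal_binary_search_min_cpus_py
  intro tasks e _
  unfold Spec_binary_search_min_cpus_py binary_search_min_cpus_py binary_search_min_cpus_py_alt
  simp only []
  set n : Int := (tasks.length : Int) with hn
  have hn0 : 0 ≤ n := by simp [hn]
  have hpost := pvBsLoop_post tasks e n 1 n n (by omega) (by omega) (by omega)
    (fun j hj1 hj2 => by omega) (Or.inl ⟨rfl, rfl⟩)
  rcases hpost with ⟨hout, hall⟩ | ⟨h1, h2, h3, h4⟩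
  · rw [hout]
    rw [pvScan_all_false tasks e n _ ?_]
    intro k hk
    have := (PySem.List.mem_pyRange_one).1 hk
    exact hall k (by omega) (by omega)
  · set r := pvBsLoop tasks e 1 n n with hr
    rw [PySem.List.pyRange_one_append 1 r (n + 1) (by omega) (by omega)]
    rw [pvScan_append tasks e n _ _ ?_]
    · rw [PySem.List.pyRange_one_cons (by omega)]
      simp only [pvScan]
      rw [if_pos h3]
    · intro k hk
      have := (PySem.List.mem_pyRange_one).1 hk
      exact h4 k (by omega) (by omega)
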